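-- pv_equiv track=rewrite | github.com/pypi-data/pypi-mirror-383 | packages/nlplite/nlplite-0.2.0.tar.gz/nlplite-0.2.0/src/nlplite/cli.py | _parse_terms_arg
-- ===== SOURCE A (Python) =====
-- def _parse_terms_arg(terms):
--     if not terms:
--         return []
--     parsed_terms = []
--     for item in terms:
--         parts = [p.strip() for p in item.split(",")]
--         for term in parts:
--             if term:
--                 parsed_terms.append(term)
--     return parsed_terms
-- ===== SOURCE B (Python) =====
-- def _parse_terms_arg(terms):
--     parsed = []
--     for item in terms:
--         tok = []
--         pend = []
--         for c in item:
--             if c == ",":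
--                 if tok:
--                     parsed.append("".join(tok))
--                 tok = []
--                 pend = []
--             elif c.isspace():
--                 if tok:
--                     pend.append(c)
--             else:
--                 tok.extend(pend)
--                 tok.append(c)
--                 pend = []
--         if tok:
--             parsed.append("".join(tok))
--     return parsed
-- ===== Notes on version B (the rewrite author's own statement) =====
-- stated objective: alternative
-- what changed: B replaces A's per-item split(",") + strip passes with a single character-level state machine that scans each item once, buffering pending inner whitespace and emitting a token at each comma or end of item, never calling split or strip.
import Mathlib
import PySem

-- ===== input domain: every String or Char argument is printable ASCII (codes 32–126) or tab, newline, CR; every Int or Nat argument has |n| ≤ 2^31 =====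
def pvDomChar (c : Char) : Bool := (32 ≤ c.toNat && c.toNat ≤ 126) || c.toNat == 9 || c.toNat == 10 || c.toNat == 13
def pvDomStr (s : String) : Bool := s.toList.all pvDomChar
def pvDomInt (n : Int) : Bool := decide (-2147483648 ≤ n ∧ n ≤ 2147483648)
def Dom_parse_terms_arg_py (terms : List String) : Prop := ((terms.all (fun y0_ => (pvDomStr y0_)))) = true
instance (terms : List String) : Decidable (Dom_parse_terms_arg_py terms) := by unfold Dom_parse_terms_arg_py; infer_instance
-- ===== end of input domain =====

-- B replaces A's per-item split+strip passes with a one-pass character state machine (objective: alternative).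

-- ===== PORT A =====
def parse_terms_arg_py (terms : List String) : List String :=
  if terms.isEmpty then []
  else
    terms.foldl (fun parsed_terms item =>
      let parts := ((PySem.Str.split? item ",").getD []).map PySem.Str.strip
      parts.foldl (fun acc term => if term ≠ "" then acc ++ [term] else acc) parsed_terms) []

-- ===== PORT B =====
-- B-side helper: the inner character loop of Source B (state: tok = current token, pend = buffered
-- inner whitespace, parsed = output so far); the base case is Source B's end-of-item flush.
def pv_scanB : List Char → List Char → List Char → List String → List String
  | [], tok, _pend, parsed => if tok ≠ [] then parsed ++ [String.ofList tok] else parsed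
  | c :: cs, tok, pend, parsed =>
    if c = ',' then
      pv_scanB cs [] [] (if tok ≠ [] then parsed ++ [String.ofList tok] else parsed)
    else if PySem.Chars.isspace c then
      pv_scanB cs tok (if tok ≠ [] then pend ++ [c] else pend) parsed
    else
      pv_scanB cs (tok ++ pend ++ [c]) [] parsed

def parse_terms_arg_py_alt (terms : List String) : List String :=
  terms.foldl (fun parsed item => pv_scanB item.toList [] [] parsed) []

-- ===== PRECONDITION & SPEC =====
def Spec_parse_terms_arg_py (terms : List String) (out : List String) : Prop := out = parse_terms_arg_py_alt terms
instance (terms : List String) (out : List String) : Decidable (Spec_parse_terms_arg_py terms out) := by unfold Spec_parse_terms_arg_py; infer_instance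

-- ===== CLAIM (what is proved, stated in full; the proofs are below) =====
def Claim_equal_parse_terms_arg_py : Prop := ∀ (terms : List String), Dom_parse_terms_arg_py terms → Spec_parse_terms_arg_py terms (parse_terms_arg_py terms)

-- ===== LEMMAS AND PROOFS =====

-- PySem's fuelled splitOn with a single-character separator is Mathlib's List.splitOnP.
theorem pv_go_spec (c : Char) : ∀ (fuel : Nat) (l cur : List Char) (acc : List (List Char)),
    l.length < fuel →
    PySem.Chars.splitOn.go [c] fuel l cur acc =
      acc.reverse ++ (cur.reverse ++ (l.splitOnP (· == c)).headI) :: (l.splitOnP (· == c)).tail := by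
  intro fuel
  induction fuel with
  | zero => intro l cur acc h; omega
  | succ n ih =>
    intro l cur acc h
    cases l with
    | nil => simp [PySem.Chars.splitOn.go, List.splitOnP_nil]
    | cons x rest =>
      obtain ⟨hd, tl, hsplit⟩ := List.exists_cons_of_ne_nil (List.splitOnP_ne_nil (· == c) rest)
      by_cases hc : c = x
      · subst hc
        simp only [PySem.Chars.splitOn.go, List.isPrefixOf, beq_self_eq_true, Bool.true_and, if_true, List.length_cons, List.length_nil, List.drop_succ_cons,
          List.drop_zero]
        rw [ih rest [] (cur.reverse :: acc) (by simpa using Nat.lt_of_succ_lt_succ h)]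
        simp [List.splitOnP_cons, hsplit]
      · have hbx : (x == c) = false := by
          simp only [beq_eq_false_iff_ne, ne_eq]
          exact fun h' => hc h'.symm
        have hcx : (c == x) = false := by
          simp only [beq_eq_false_iff_ne, ne_eq]
          exact hc
        simp only [PySem.Chars.splitOn.go, List.isPrefixOf,
          Bool.and_true, hcx, Bool.false_eq_true, if_false]
        rw [ih rest (x :: cur) acc (by simpa using Nat.lt_of_succ_lt_succ h)]
        simp [List.splitOnP_cons, hbx, hsplit]

theorem pv_splitOn_char (c : Char) (cs : List Char) :
    PySem.Chars.splitOn cs [c] = cs.splitOnP (· == c) := by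
  unfold PySem.Chars.splitOn
  rw [pv_go_spec c (cs.length + 1) cs [] [] (Nat.lt_succ_self _)]
  obtain ⟨hd, tl, hsplit⟩ := List.exists_cons_of_ne_nil (List.splitOnP_ne_nil (· == c) cs)
  simp [hsplit]

-- A's inner loop appends exactly the nonempty parts
theorem pv_inner (parts : List String) : ∀ (parsed : List String),
    parts.foldl (fun acc term => if term ≠ "" then acc ++ [term] else acc) parsed
      = parsed ++ parts.filter (fun t => t ≠ "") := by
  induction parts with
  | nil => simp
  | cons p ps ih =>
    intro parsed
    rw [List.foldl_cons, List.filter_cons]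
    by_cases hp : p = ""
    · rw [if_neg (by simpa using hp), if_neg (by simp [hp])]
      exact ih parsed
    · rw [if_pos (by simpa using hp), if_pos (by simp [hp])]
      rw [ih (parsed ++ [p])]
      simp

def pv_gA (item : String) : List String :=
  (((PySem.Str.split? item ",").getD []).map PySem.Str.strip).filter (fun t => t ≠ "")

theorem pv_outer : ∀ (l : List String) (init : List String),
    l.foldl (fun parsed_terms item =>
        (((PySem.Str.split? item ",").getD []).map PySem.Str.strip).foldl
          (fun acc term => if term ≠ "" then acc ++ [term] else acc) parsed_terms) init
      = init ++ l.flatMap pv_gA := by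
  intro l
  induction l with
  | nil => simp
  | cons a ls ih =>
    intro init
    rw [List.foldl_cons, pv_inner, ih]
    simp [pv_gA, List.append_assoc]

theorem pv_ofList_ne_empty (cs : List Char) : (String.ofList cs ≠ "") ↔ cs ≠ [] := by
  constructor
  · intro h hnil; exact h (by simp [hnil])
  · intro h he
    have := congrArg String.toList he
    simp at this
    exact h this

-- pieces → strip → filter, pushed through String.ofList
theorem pv_pieces (xs : List (List Char)) :
    ((xs.map String.ofList).map PySem.Str.strip).filter (fun s => s ≠ "")
      = ((xs.map PySem.Chars.strip).filter (fun cs => cs ≠ [])).map String.ofList := by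
  induction xs with
  | nil => simp
  | cons a rest ih =>
    have hstrip : PySem.Str.strip (String.ofList a) = String.ofList (PySem.Chars.strip a) := by
      simp [PySem.Str.strip]
    simp only [List.map_cons, List.filter_cons, hstrip]
    by_cases hne : PySem.Chars.strip a = []
    · rw [if_neg (by simp [hne]), if_neg (by simp [hne])]
      exact ih
    · rw [if_pos (by simp [(pv_ofList_ne_empty _).mpr hne]), if_pos (by simp [hne])]
      rw [ih]
      simp

-- the split pieces of one item, at the Chars level
theorem pv_split_item (s : String) :
    (PySem.Str.split? s ",").getD [] = (s.toList.splitOnP (· == ',')).map String.ofList := by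
  simp [PySem.Str.split?, PySem.Chars.split?, pv_splitOn_char]

theorem pv_gA_eq (item : String) :
    pv_gA item = ((((item.toList.splitOnP (· == ',')).map PySem.Chars.strip).filter
      (fun cs => cs ≠ [])).map String.ofList) := by
  rw [pv_gA, pv_split_item, pv_pieces]

-- a list equal to its own strip is fixed by lstrip and rstrip separately
theorem pv_strip_fix (l : List Char) (h : PySem.Chars.strip l = l) :
    PySem.Chars.lstrip l = l ∧ PySem.Chars.rstrip l = l := by
  have hsuf : PySem.Chars.lstrip l <:+ l := List.dropWhile_suffix _
  have hlen1 : (PySem.Chars.lstrip l).length ≤ l.length := hsuf.length_le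
  have hpre : PySem.Chars.rstrip (PySem.Chars.lstrip l) <+: PySem.Chars.lstrip l := by
    simpa [PySem.Chars.rstrip] using
      (List.dropWhile_suffix (l := (PySem.Chars.lstrip l).reverse) (p := PySem.Chars.isspace)).reverse
  have hlen2 : l.length ≤ (PySem.Chars.lstrip l).length := by
    calc l.length = (PySem.Chars.rstrip (PySem.Chars.lstrip l)).length := by
          rw [show PySem.Chars.rstrip (PySem.Chars.lstrip l) = l from h]
      _ ≤ (PySem.Chars.lstrip l).length := hpre.length_le
  have hl : PySem.Chars.lstrip l = l := hsuf.eq_of_length (le_antisymm hlen1 hlen2)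
  refine ⟨hl, ?_⟩
  have h2 : PySem.Chars.rstrip (PySem.Chars.lstrip l) = l := h
  rw [hl] at h2; exact h2

-- the head of a strip-fixed nonempty list is not whitespace
theorem pv_head_nonspace (a : Char) (t : List Char)
    (htok : PySem.Chars.strip (a :: t) = a :: t) : PySem.Chars.isspace a = false := by
  have hl := (pv_strip_fix _ htok).1
  by_cases ha : PySem.Chars.isspace a = true
  · exfalso
    have : List.dropWhile PySem.Chars.isspace t = a :: t := by
      simpa [PySem.Chars.lstrip, List.dropWhile_cons_of_pos, ha] using hl
    have hlen : (List.dropWhile PySem.Chars.isspace t).length ≤ t.length :=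
      (List.dropWhile_suffix _).length_le
    rw [this] at hlen
    simp at hlen
  · simpa using ha

theorem pv_strip_append_spaces (tok pend : List Char)
    (htok : PySem.Chars.strip tok = tok)
    (hp : ∀ c ∈ pend, PySem.Chars.isspace c = true)
    (hnil : tok = [] → pend = []) :
    PySem.Chars.strip (tok ++ pend) = tok := by
  cases tok with
  | nil =>
    rw [hnil rfl]
    simp [PySem.Chars.strip, PySem.Chars.lstrip, PySem.Chars.rstrip]
  | cons a t =>
    have ha := pv_head_nonspace a t htok
    have hr := (pv_strip_fix _ htok).2
    have hrd : List.dropWhile PySem.Chars.isspace (a :: t).reverse = (a :: t).reverse := by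
      have := congrArg List.reverse hr
      simpa [PySem.Chars.rstrip] using this
    have hpendnil : List.dropWhile PySem.Chars.isspace pend.reverse = [] := by
      rw [List.dropWhile_eq_nil_iff]
      intro x hx; exact hp x (by simpa using hx)
    unfold PySem.Chars.strip PySem.Chars.lstrip PySem.Chars.rstrip
    rw [List.cons_append, List.dropWhile_cons_of_neg (by simp [ha])]
    have hrev : (a :: (t ++ pend)).reverse = pend.reverse ++ (a :: t).reverse := by simp
    have hrd' : List.dropWhile PySem.Chars.isspace (t.reverse ++ [a]) = t.reverse ++ [a] := by
      simpa using hrd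
    rw [hrev, List.dropWhile_append, hpendnil]
    simp [hrd']

theorem pv_strip_cons_space (c : Char) (x : List Char) (hc : PySem.Chars.isspace c = true) :
    PySem.Chars.strip (c :: x) = PySem.Chars.strip x := by
  simp [PySem.Chars.strip, PySem.Chars.lstrip, List.dropWhile_cons_of_pos, hc]

theorem pv_strip_snoc_nonspace (tok pend : List Char) (c : Char)
    (htok : PySem.Chars.strip tok = tok)
    (_hp : ∀ d ∈ pend, PySem.Chars.isspace d = true)
    (hnil : tok = [] → pend = [])
    (hc : PySem.Chars.isspace c = false) :
    PySem.Chars.strip (tok ++ pend ++ [c]) = tok ++ pend ++ [c] := by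
  obtain ⟨b, rest, hw, hb⟩ : ∃ b rest, tok ++ pend ++ [c] = b :: rest ∧ PySem.Chars.isspace b = false := by
    cases tok with
    | nil => rw [hnil rfl]; exact ⟨c, [], by simp, hc⟩
    | cons a t => exact ⟨a, t ++ pend ++ [c], by simp, pv_head_nonspace a t htok⟩
  have hrev : (tok ++ pend ++ [c]).reverse = c :: (tok ++ pend).reverse := by simp
  unfold PySem.Chars.strip PySem.Chars.lstrip PySem.Chars.rstrip
  rw [hw, List.dropWhile_cons_of_neg (by simp [hb]), ← hw, hrev,
    List.dropWhile_cons_of_neg (by simp [hc]), ← hrev, List.reverse_reverse]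

-- the state machine computes strip+filter of the comma pieces
theorem pv_scan_spec : ∀ (l tok pend : List Char) (parsed : List String),
    PySem.Chars.strip tok = tok →
    (∀ c ∈ pend, PySem.Chars.isspace c = true) →
    (tok = [] → pend = []) →
    pv_scanB l tok pend parsed =
      parsed ++ ((((tok ++ pend ++ (l.splitOnP (· == ',')).headI) :: (l.splitOnP (· == ',')).tail).map
        PySem.Chars.strip).filter (fun cs => cs ≠ [])).map String.ofList := by
  intro l
  induction l with
  | nil =>
    intro tok pend parsed htok hp hnil
    simp only [pv_scanB, List.splitOnP_nil, List.headI_cons, List.tail_cons, List.append_nil,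
      List.map_cons, List.map_nil, List.filter_cons, List.filter_nil]
    rw [pv_strip_append_spaces tok pend htok hp hnil]
    by_cases ht : tok = []
    · subst ht; simp
    · simp [ht]
  | cons c cs ih =>
    intro tok pend parsed htok hp hnil
    obtain ⟨hd, tl, hsplit⟩ := List.exists_cons_of_ne_nil (List.splitOnP_ne_nil (· == ',') cs)
    by_cases hc : c = ','
    · subst hc
      simp only [pv_scanB]
      rw [ih [] [] _ (by simp [PySem.Chars.strip, PySem.Chars.lstrip, PySem.Chars.rstrip])
        (by simp) (fun _ => rfl), hsplit]
      have hsp' : (',' :: cs).splitOnP (· == ',') = [] :: hd :: tl := by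
        rw [List.splitOnP_cons, if_pos (by simp), hsplit]
      rw [hsp']
      simp only [List.headI_cons, List.tail_cons, List.append_nil, List.map_cons,
        List.filter_cons, pv_strip_append_spaces tok pend htok hp hnil]
      by_cases ht : tok = []
      · subst ht; simp
      · simp [ht]
    · have hsp' : (c :: cs).splitOnP (· == ',') = (c :: hd) :: tl := by
        rw [List.splitOnP_cons, if_neg (by simpa using hc), hsplit, List.modifyHead_cons]
      by_cases hspace : PySem.Chars.isspace c = true
      · simp only [pv_scanB, if_neg hc, if_pos hspace]
        by_cases ht : tok = []
        · subst ht
          rw [hnil rfl]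
          simp only [ne_eq, not_true_eq_false, if_false]
          rw [ih [] [] parsed (by simp [PySem.Chars.strip, PySem.Chars.lstrip, PySem.Chars.rstrip])
            (by simp) (fun _ => rfl), hsplit, hsp']
          simp only [List.headI_cons, List.tail_cons, List.nil_append, List.map_cons, List.filter_cons]
          rw [pv_strip_cons_space c hd hspace]
        · rw [if_pos (by simpa using ht)]
          rw [ih tok (pend ++ [c]) parsed htok
            (by intro d hdm; rcases List.mem_append.1 hdm with h1 | h1
                · exact hp d h1
                · simp at h1; subst h1; exact hspace)
            (fun h => absurd h ht), hsplit, hsp']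
          simp only [List.headI_cons, List.tail_cons]
          have : tok ++ (pend ++ [c]) ++ hd = tok ++ pend ++ (c :: hd) := by simp
          rw [this]
      · have hspf : PySem.Chars.isspace c = false := by simpa using hspace
        simp only [pv_scanB, if_neg hc, if_neg hspace]
        rw [ih (tok ++ pend ++ [c]) [] parsed
          (pv_strip_snoc_nonspace tok pend c htok hp hnil hspf)
          (by simp) (by intro h; rfl), hsplit, hsp']
        simp only [List.headI_cons, List.tail_cons, List.append_nil]
        have : tok ++ pend ++ [c] ++ hd = tok ++ pend ++ (c :: hd) := by simp
        rw [this]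

theorem pv_scan_item (item : String) (parsed : List String) :
    pv_scanB item.toList [] [] parsed = parsed ++ pv_gA item := by
  obtain ⟨hd, tl, hsplit⟩ :=
    List.exists_cons_of_ne_nil (List.splitOnP_ne_nil (· == ',') item.toList)
  rw [pv_scan_spec item.toList [] [] parsed (by simp [PySem.Chars.strip, PySem.Chars.lstrip, PySem.Chars.rstrip]) (by simp) (fun _ => rfl),
    pv_gA_eq, hsplit]
  simp

theorem pv_alt_flat : ∀ (l : List String) (init : List String),
    l.foldl (fun parsed item => pv_scanB item.toList [] [] parsed) init = init ++ l.flatMap pv_gA := by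
  intro l
  induction l with
  | nil => simp
  | cons a ls ih =>
    intro init
    rw [List.foldl_cons, pv_scan_item, ih]
    simp [List.append_assoc]

-- ===== VERDICT (by name: the statement is the Claim_ definition above) =====
theorem parse_terms_arg_py_spec : Claim_equal_parse_terms_arg_py := by
  intro terms _
  unfold Spec_parse_terms_arg_py parse_terms_arg_py parse_terms_arg_py_alt
  cases terms with
  | nil => simp
  | cons a ts =>
    simp only [List.isEmpty_cons, if_neg Bool.false_ne_true]
    rw [pv_outer, pv_alt_flat]
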